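-- pv_equiv track=rewrite | github.com/xlordz/loki-mode | dashboard/auth.py | has_scope
-- ===== SOURCE A (Python) =====
-- _SCOPE_HIERARCHY = {
--     "*": {"control", "write", "read", "audit", "admin"},
--     "control": {"write", "read"},
--     "write": {"read"},
-- }
--
-- def has_scope(token_info: dict, required_scope: str) -> bool:
--     """
--     Check if a token has a required scope, respecting scope hierarchy.
--
--     Hierarchy (higher scopes implicitly grant lower ones):
--         * -> control -> write -> read
--         * also grants audit, admin, and all other scopes
--
--     Args:
--         token_info: Token metadata from validate_token
--         required_scope: The scope to check
--
--     Returns: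
--         True if token has the scope (directly or via hierarchy)
--     """
--     scopes = token_info.get("scopes", [])
--
--     # Direct match
--     if required_scope in scopes:
--         return True
--
--     # Check hierarchy: does any held scope implicitly grant the required one?
--     for scope in scopes:
--         implied = _SCOPE_HIERARCHY.get(scope, set())
--         if required_scope in implied:
--             return True
--
--     return False
-- ===== SOURCE B (Python) =====
-- _SCOPE_HIERARCHY = {
--     "*": {"control", "write", "read", "audit", "admin"},
--     "control": {"write", "read"},
--     "write": {"read"},
-- }
--
-- def has_scope(token_info: dict, required_scope: str) -> bool:
--     # Invert the question: compute from the static hierarchy the set of scopes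
--     # that would grant required_scope, then make a single pass over the held
--     # scopes testing membership in that granter set.
--     granters = {required_scope}
--     for parent, implied in _SCOPE_HIERARCHY.items():
--         if required_scope in implied:
--             granters.add(parent)
--     return any(s in granters for s in token_info.get("scopes", []))
-- ===== Notes on version B (the rewrite author's own statement) =====
-- stated objective: alternative
-- what changed: Instead of checking the required scope directly and then scanning the hierarchy entry of each held scope, B first inverts the static hierarchy into the set of scopes that grant required_scope and then makes one membership pass over the held scopes.
import Mathlib
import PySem

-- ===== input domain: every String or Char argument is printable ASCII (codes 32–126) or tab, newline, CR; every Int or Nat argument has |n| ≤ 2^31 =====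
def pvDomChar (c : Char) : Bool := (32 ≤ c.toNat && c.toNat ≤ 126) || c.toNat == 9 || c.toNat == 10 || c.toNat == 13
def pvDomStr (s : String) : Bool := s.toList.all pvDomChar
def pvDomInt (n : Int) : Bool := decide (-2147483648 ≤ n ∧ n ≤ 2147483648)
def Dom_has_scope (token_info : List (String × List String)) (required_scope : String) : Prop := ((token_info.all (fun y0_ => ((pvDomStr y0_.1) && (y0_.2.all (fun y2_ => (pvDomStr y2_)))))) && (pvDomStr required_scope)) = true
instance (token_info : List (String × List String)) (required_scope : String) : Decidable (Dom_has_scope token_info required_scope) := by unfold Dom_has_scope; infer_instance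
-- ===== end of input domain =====

-- B inverts the static scope hierarchy into the set of scopes granting required_scope, then does one membership pass over the held scopes; equal value, different decomposition.


-- ===== PORT A =====
-- _SCOPE_HIERARCHY: module constant shared by both versions
def pvScopeHierarchy : PySem.Dict String (PySem.Set String) :=
  PySem.Dict.ofList
    [("*", PySem.Set.ofList ["control", "write", "read", "audit", "admin"]),
     ("control", PySem.Set.ofList ["write", "read"]),
     ("write", PySem.Set.ofList ["read"])]

def has_scope (token_info : List (String × List String)) (required_scope : String) : Bool :=
  let scopes := (PySem.Dict.mk token_info).getD "scopes" []
  if scopes.contains required_scope then true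
  else
    scopes.any (fun scope =>
      PySem.Set.contains (pvScopeHierarchy.getD scope PySem.Set.empty) required_scope)

-- ===== PORT B =====
def has_scope_alt (token_info : List (String × List String)) (required_scope : String) : Bool :=
  let granters := pvScopeHierarchy.items.foldl
    (fun g p => if PySem.Set.contains p.2 required_scope then PySem.Set.add g p.1 else g)
    (PySem.Set.ofList [required_scope])
  ((PySem.Dict.mk token_info).getD "scopes" []).any (fun s => PySem.Set.contains granters s)

-- ===== PRECONDITION & SPEC =====
def Spec_has_scope (token_info : List (String × List String)) (required_scope : String) (out : Bool) : Prop := out = has_scope_alt token_info required_scope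
instance (token_info : List (String × List String)) (required_scope : String) (out : Bool) : Decidable (Spec_has_scope token_info required_scope out) := by unfold Spec_has_scope; infer_instance

-- ===== CLAIM (what is proved, stated in full; the proofs are below) =====
def Claim_equal_has_scope : Prop := ∀ (token_info : List (String × List String)) (required_scope : String), Dom_has_scope token_info required_scope → Spec_has_scope token_info required_scope (has_scope token_info required_scope)

-- ===== LEMMAS AND PROOFS =====

-- B's granter set contains s exactly when s is the required scope itself or s's hierarchy entry contains it.
lemma granters_contains (rs s : String) :
    PySem.Set.contains
      (pvScopeHierarchy.items.foldl
        (fun g p => if PySem.Set.contains p.2 rs then PySem.Set.add g p.1 else g)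
        (PySem.Set.ofList [rs])) s
    = ((s == rs) ||
       PySem.Set.contains (pvScopeHierarchy.getD s PySem.Set.empty) rs) := by
  have hmk : pvScopeHierarchy = PySem.Dict.mk [("*", ["control", "write", "read", "audit", "admin"]), ("control", ["write", "read"]), ("write", ["read"])] := by decide
  rw [hmk]
  simp only [List.foldl_cons, List.foldl_nil]
  rw [Bool.eq_iff_iff]
  by_cases h4 : "*" = s <;> by_cases h5 : "control" = s <;> by_cases h6 : "write" = s <;>
    split_ifs <;>
    simp_all [PySem.Dict.getD, PySem.Set.mem_add, PySem.Set.mem_ofList, PySem.Dict.get?]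
  all_goals intro hx
  all_goals (try rcases hx with hx|hx|hx)
  all_goals simp_all

lemma any_pointwise {α : Type} (l : List α) (f g : α → Bool)
    (h : ∀ x ∈ l, f x = g x) : l.any f = l.any g := by
  induction l with
  | nil => rfl
  | cons a t ih =>
    simp only [List.any_cons, h a (by simp), ih (fun x hx => h x (by simp [hx]))]

-- A's direct-match-then-scan equals one pass testing "equals rs, or grants rs".
lemma any_or_contains (l : List String) (rs : String) (f : String → Bool) :
    (if l.contains rs then true else l.any f) = l.any (fun s => (s == rs) || f s) := by
  induction l with
  | nil => rfl
  | cons a t ih =>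
    by_cases h : a = rs
    · simp [h]
    · cases hc : t.contains rs <;> simp_all [← ih, Ne.symm h, beq_eq_false_iff_ne.mpr h]

-- ===== VERDICT (by name: the statement is the Claim_ definition above) =====
theorem has_scope_spec : Claim_equal_has_scope := by
  intro ti rs _
  unfold Spec_has_scope
  simp only [has_scope, has_scope_alt]
  rw [any_pointwise _ _ _ (fun x _ => granters_contains rs x)]
  exact any_or_contains _ rs _
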